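-- pv_equiv track=rewrite | github.com/igor-popryadukhin/goszakupki-bot | src/monitor/semantic_matcher.py | _tokens_related
-- ===== SOURCE A (Python) =====
-- def _tokens_related(left: str, right: str) -> bool:
--     if left == right:
--         return True
--     if left.startswith(right) or right.startswith(left):
--         return True
--     common = 0
--     for left_char, right_char in zip(left, right):
--         if left_char != right_char:
--             break
--         common += 1
--     return common >= 5
-- ===== SOURCE B (Python) =====
-- def _tokens_related(left: str, right: str) -> bool:
--     return left[:5] == right[:5] or left.startswith(right) or right.startswith(left)
-- ===== Notes on version B (the rewrite author's own statement) =====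
-- stated objective: simpler
-- what changed: Removes the counting break-loop entirely: B compares the fixed-width slices left[:5] == right[:5] (one string comparison) together with the two prefix tests, since a 5-char common prefix is exactly equality of the 5-slices unless one string is shorter, in which case a slice match already means it is a prefix of the other.
import Mathlib
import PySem

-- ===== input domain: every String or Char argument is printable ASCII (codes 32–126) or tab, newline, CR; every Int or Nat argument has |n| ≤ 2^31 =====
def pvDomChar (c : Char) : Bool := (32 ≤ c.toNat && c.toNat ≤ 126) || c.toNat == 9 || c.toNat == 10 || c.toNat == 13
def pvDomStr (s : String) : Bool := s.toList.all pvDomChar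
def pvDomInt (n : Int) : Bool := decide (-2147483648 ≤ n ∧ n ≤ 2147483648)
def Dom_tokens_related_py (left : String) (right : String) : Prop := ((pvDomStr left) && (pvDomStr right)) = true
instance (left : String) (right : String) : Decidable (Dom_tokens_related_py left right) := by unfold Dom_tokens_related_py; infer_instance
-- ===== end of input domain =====

-- B drops A's counting break-loop and decides relatedness by one fixed-width slice comparison left[:5] == right[:5] plus the two prefix tests (simpler decomposition; same cost).


-- ===== PORT A =====
-- the 'for … in zip(…): if diff: break; common += 1' loop of A
def pvCommonLoop : List Char → List Char → Nat
  | a :: l, b :: r => if a ≠ b then 0 else pvCommonLoop l r + 1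
  | _, _ => 0

def tokens_related_py (left : String) (right : String) : Bool :=
  if left == right then true
  else if PySem.Str.startswith left right || PySem.Str.startswith right left then true
  else decide (pvCommonLoop left.toList right.toList ≥ 5)

-- ===== PORT B =====
-- left[:5] == right[:5] or left.startswith(right) or right.startswith(left)
def tokens_related_py_alt (left : String) (right : String) : Bool :=
  (PySem.List.slice left.toList none (some 5) == PySem.List.slice right.toList none (some 5))
  || PySem.Str.startswith left right || PySem.Str.startswith right left

-- ===== PRECONDITION & SPEC =====
def Spec_tokens_related_py (left : String) (right : String) (out : Bool) : Prop := out = tokens_related_py_alt left right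
instance (left : String) (right : String) (out : Bool) : Decidable (Spec_tokens_related_py left right out) := by unfold Spec_tokens_related_py; infer_instance

-- ===== CLAIM (what is proved, stated in full; the proofs are below) =====
def Claim_equal_tokens_related_py : Prop := ∀ (left : String) (right : String), Dom_tokens_related_py left right → Spec_tokens_related_py left right (tokens_related_py left right)

-- ===== LEMMAS AND PROOFS =====

-- when neither list is a prefix of the other, the first n chars agree iff A's loop counts at least n
theorem take_eq_iff_commonLoop (l r : List Char) (n : Nat)
    (h1 : ¬ l <+: r) (h2 : ¬ r <+: l) :
    l.take n = r.take n ↔ n ≤ pvCommonLoop l r := by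
  induction l generalizing r n with
  | nil => exact absurd (List.nil_prefix) h1
  | cons a l ih =>
    cases r with
    | nil => exact absurd (List.nil_prefix) h2
    | cons b r =>
      cases n with
      | zero => simp [pvCommonLoop]
      | succ n =>
        by_cases h : a = b
        · subst h
          have h1' : ¬ l <+: r := fun hp => h1 (List.cons_prefix_cons.mpr ⟨rfl, hp⟩)
          have h2' : ¬ r <+: l := fun hp => h2 (List.cons_prefix_cons.mpr ⟨rfl, hp⟩)
          simp [pvCommonLoop, List.take_succ_cons, ih r n h1' h2']
        · simp [pvCommonLoop, h, List.take_succ_cons]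

-- ===== VERDICT (by name: the statement is the Claim_ definition above) =====
theorem tokens_related_py_spec : Claim_equal_tokens_related_py := by
  intro left right _
  unfold Spec_tokens_related_py tokens_related_py tokens_related_py_alt
  rw [show PySem.List.slice left.toList none (some 5) = left.toList.take 5 from
        PySem.List.slice_to _ (by norm_num : (0:Int) ≤ 5),
      show PySem.List.slice right.toList none (some 5) = right.toList.take 5 from
        PySem.List.slice_to _ (by norm_num : (0:Int) ≤ 5)]
  by_cases heq : left = right
  · subst heq; simp
  · simp only [beq_iff_eq, heq, if_false]
    by_cases hsw : PySem.Str.startswith left right = true ∨ PySem.Str.startswith right left = true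
    · rcases hsw with h | h <;> simp <;> simp only [PySem.Str.startswith_eq] at h <;> simp [h]
    · rw [not_or, Bool.not_eq_true, Bool.not_eq_true] at hsw
      have h1 : ¬ left.toList <+: right.toList := fun hp =>
        absurd ((PySem.Chars.startswith_iff right.toList left.toList).mpr hp) (by simp_all)
      have h2 : ¬ right.toList <+: left.toList := fun hp =>
        absurd ((PySem.Chars.startswith_iff left.toList right.toList).mpr hp) (by simp_all)
      have hkey := take_eq_iff_commonLoop left.toList right.toList 5 h1 h2
      rw [hsw.1, hsw.2]
      simp only [Bool.or_self, Bool.or_false]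
      by_cases hc : (5:Nat) ≤ pvCommonLoop left.toList right.toList
      · simp [hc, hkey.mpr hc, ge_iff_le]
      · have hne : ¬ left.toList.take 5 = right.toList.take 5 := fun h => hc (hkey.mp h)
        simp [hc, hne, ge_iff_le]
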